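-- pv_equiv track=rewrite | github.com/reidmcy/csc-2611-final-project | scripts/scaper/get_targets.py | prepTargets
-- ===== SOURCE A (Python) =====
-- def prepTargets(tLst, maxPerBin = 100):
--     ret = []
--     s = []
--     for i, t in enumerate(tLst):
--         s.append((i, len(tLst), t))
--         if i % maxPerBin == 0:
--             ret.append(s)
--             s = []
--     ret.append(s)
--     return [l for l in ret if len(l) > 0]
-- ===== SOURCE B (Python) =====
-- def prepTargets(tLst, maxPerBin = 100):
--     n = len(tLst)
--     tuples = [(i, n, t) for i, t in enumerate(tLst)]
--     ends = [j + 1 for j in range(n) if j % maxPerBin == 0] + [n]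
--     bins = []
--     start = 0
--     for e in ends:
--         if start < e:
--             bins.append(tuples[start:e])
--         start = e
--     return bins
-- ===== Notes on version B (the rewrite author's own statement) =====
-- stated objective: alternative
-- what changed: Replaces A's single-pass two-accumulator loop (growing a current bin and flushing it at each boundary) with a boundary-compute-then-slice decomposition: build the tuple list once, compute all bin end-boundaries from the same modulus condition, then slice the tuple list between consecutive boundaries, keeping only non-empty slices.
import Mathlib
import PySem

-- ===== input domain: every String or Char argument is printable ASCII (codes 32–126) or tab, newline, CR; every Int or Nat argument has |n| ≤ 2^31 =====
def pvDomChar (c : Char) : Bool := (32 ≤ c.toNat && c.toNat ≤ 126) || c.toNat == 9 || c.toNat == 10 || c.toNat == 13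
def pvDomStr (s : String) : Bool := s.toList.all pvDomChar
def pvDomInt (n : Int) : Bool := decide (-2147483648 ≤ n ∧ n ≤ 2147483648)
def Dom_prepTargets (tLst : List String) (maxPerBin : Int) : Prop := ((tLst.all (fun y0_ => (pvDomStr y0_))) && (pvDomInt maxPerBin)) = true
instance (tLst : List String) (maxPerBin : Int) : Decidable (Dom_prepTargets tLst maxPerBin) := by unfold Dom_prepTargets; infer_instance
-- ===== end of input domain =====

-- B replaces A's single-pass accumulator loop with a compute-boundaries-then-slice
-- decomposition (objective: alternative; same behaviour, including the size-1 first bin).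

-- ===== PORT A =====
-- A's 'for i, t in enumerate(tLst)' loop with its two accumulators ret and s.
def prepA_loop (n m : Int) : List String → Int → List (List (Int × Int × String)) → List (Int × Int × String) → (List (List (Int × Int × String)) × List (Int × Int × String))
  | [], _, ret, s => (ret, s)
  | t :: ts, i, ret, s =>
      let s' := s ++ [(i, n, t)]
      if PySem.Int.mod i m = 0 then prepA_loop n m ts (i + 1) (ret ++ [s']) []
      else prepA_loop n m ts (i + 1) ret s'

def prepTargets (tLst : List String) (maxPerBin : Int) : List (List (Int × Int × String)) :=
  let n : Int := tLst.length
  let p := prepA_loop n maxPerBin tLst 0 [] []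
  (p.1 ++ [p.2]).filter (fun l => decide (0 < l.length))

-- ===== PORT B =====
-- B's loop over the precomputed end boundaries, slicing tuples[start:e].
def prepB_loop (tuples : List (Int × Int × String)) : List Int → Int → List (List (Int × Int × String)) → List (List (Int × Int × String))
  | [], _, bins => bins
  | e :: es, start, bins =>
      if start < e then prepB_loop tuples es e (bins ++ [PySem.List.slice tuples (some start) (some e)])
      else prepB_loop tuples es e bins

def prepTargets_alt (tLst : List String) (maxPerBin : Int) : List (List (Int × Int × String)) :=
  let n : Int := tLst.length
  let tuples := (PySem.List.enumerate tLst 0).map (fun p => (p.1, n, p.2))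
  let ends := ((PySem.List.pyRange 0 n 1).filter (fun j => decide (PySem.Int.mod j maxPerBin = 0))).map (· + 1) ++ [n]
  prepB_loop tuples ends 0 []

-- ===== PRECONDITION & SPEC =====
-- Pre_ excludes maxPerBin = 0 with a nonempty list: there Python's 'i % maxPerBin' raises
-- ZeroDivisionError in A (and in B's comprehension alike).
def Pre_prepTargets (tLst : List String) (maxPerBin : Int) : Prop := tLst = [] ∨ maxPerBin ≠ 0
instance (tLst : List String) (maxPerBin : Int) : Decidable (Pre_prepTargets tLst maxPerBin) := by unfold Pre_prepTargets; infer_instance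
def pvWitness_prepTargets : List String × Int := (["a", "b", "c"], 2)

def Spec_prepTargets (tLst : List String) (maxPerBin : Int) (out : List (List (Int × Int × String))) : Prop := out = prepTargets_alt tLst maxPerBin
instance (tLst : List String) (maxPerBin : Int) (out : List (List (Int × Int × String))) : Decidable (Spec_prepTargets tLst maxPerBin out) := by unfold Spec_prepTargets; infer_instance

-- ===== CLAIM (what is proved, stated in full; the proofs are below) =====
def Claim_equal_prepTargets : Prop := ∀ (tLst : List String) (maxPerBin : Int), Dom_prepTargets tLst maxPerBin → Pre_prepTargets tLst maxPerBin → Spec_prepTargets tLst maxPerBin (prepTargets tLst maxPerBin)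

-- ===== LEMMAS AND PROOFS =====

-- Reference chunking: one bin is closed after each index i with i % m == 0; the trailing
-- accumulator survives only if nonempty.  Both ports are shown equal to this.
def refChunk (n m : Int) : List String → Int → List (Int × Int × String) → List (List (Int × Int × String))
  | [], _, s => if s.isEmpty then [] else [s]
  | t :: ts, i, s =>
      if PySem.Int.mod i m = 0 then (s ++ [(i, n, t)]) :: refChunk n m ts (i + 1) []
      else refChunk n m ts (i + 1) (s ++ [(i, n, t)])

def tuplesOf (tLst : List String) : List (Int × Int × String) :=
  (PySem.List.enumerate tLst 0).map (fun p => (p.1, (tLst.length : Int), p.2))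

def endsFrom (m : Int) (len i : Nat) : List Int :=
  ((PySem.List.pyRange (i : Int) (len : Int) 1).filter (fun j => decide (PySem.Int.mod j m = 0))).map (· + 1) ++ [(len : Int)]

lemma prepA_loop_filter (n m : Int) (ts : List String) (i : Int)
    (ret : List (List (Int × Int × String))) (s : List (Int × Int × String)) :
    ((prepA_loop n m ts i ret s).1 ++ [(prepA_loop n m ts i ret s).2]).filter (fun l => decide (0 < l.length))
      = ret.filter (fun l => decide (0 < l.length)) ++ refChunk n m ts i s := by
  induction ts generalizing i ret s with
  | nil =>
      simp only [prepA_loop, refChunk, List.filter_append, List.filter]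
      cases s <;> simp
  | cons t ts ih =>
      simp only [prepA_loop, refChunk]
      by_cases h : PySem.Int.mod i m = 0
      · simp only [h, if_true, ih]
        simp [List.filter_append]
      · simp only [if_neg h, ih]

lemma prepA_eq_refChunk (tLst : List String) (m : Int) :
    prepTargets tLst m = refChunk (tLst.length : Int) m tLst 0 [] := by
  have h := prepA_loop_filter (tLst.length : Int) m tLst 0 [] []
  simpa [prepTargets] using h

lemma prepB_loop_acc (tuples : List (Int × Int × String)) (es : List Int) (start : Int)
    (bins : List (List (Int × Int × String))) :
    prepB_loop tuples es start bins = bins ++ prepB_loop tuples es start [] := by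
  induction es generalizing start bins with
  | nil => simp [prepB_loop]
  | cons e es ih =>
      simp only [prepB_loop]
      by_cases h : start < e
      · rw [if_pos h, if_pos h, ih e (bins ++ _), ih e ([] ++ _)]
        simp
      · rw [if_neg h, if_neg h]
        exact ih e bins

lemma tuplesOf_getElem (tLst : List String) (i : Nat) (h : i < tLst.length) :
    (tuplesOf tLst)[i]'(by simp [tuplesOf, PySem.List.length_enumerate, h]) = ((i : Int), (tLst.length : Int), tLst[i]) := by
  simp [tuplesOf, PySem.List.getElem_enumerate]

lemma length_tuplesOf (tLst : List String) : (tuplesOf tLst).length = tLst.length := by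
  simp [tuplesOf, PySem.List.length_enumerate]

lemma refChunk_eq_prepB (tLst : List String) (m : Int) :
    ∀ (ts : List String) (i start : Nat), ts = tLst.drop i → start ≤ i → i ≤ tLst.length →
    refChunk (tLst.length : Int) m ts (i : Int)
        (PySem.List.slice (tuplesOf tLst) (some (start : Int)) (some (i : Int)))
      = prepB_loop (tuplesOf tLst) (endsFrom m tLst.length i) (start : Int) [] := by
  intro ts
  induction ts with
  | nil =>
      intro i start hdrop hsi hin
      have hi : i = tLst.length := by
        have := List.drop_eq_nil_iff.mp hdrop.symm
        omega
      subst hi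
      simp only [refChunk, endsFrom]
      rw [PySem.List.pyRange_one_eq_nil (by omega)]
      simp only [List.filter_nil, List.map_nil, List.nil_append, prepB_loop]
      rw [PySem.List.slice_natCast]
      have hlen : ((List.drop start (tuplesOf tLst)).take (tLst.length - start)).length
          = tLst.length - start := by
        simp [length_tuplesOf]
      by_cases h : start < tLst.length
      · rw [if_neg (by
          rw [List.isEmpty_iff]
          intro hnil
          rw [hnil] at hlen
          simp at hlen
          omega)]
        rw [if_pos (by exact_mod_cast h)]
      · have hst : start = tLst.length := by omega
        subst hst
        rw [if_pos (by
          rw [List.isEmpty_iff, ← List.length_eq_zero_iff]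
          omega)]
        rw [if_neg (by exact_mod_cast h)]
  | cons t ts ih =>
      intro i start hdrop hsi hin
      have hi : i < tLst.length := by
        by_contra h
        rw [List.drop_eq_nil_iff.mpr (by omega)] at hdrop
        exact (List.cons_ne_nil t ts) hdrop
      have ht : tLst[i]'hi = t := by
        have h0 : (tLst.drop i)[0]'(by rw [← hdrop]; simp) = t := by
          simp [← hdrop]
        simpa using h0
      have hts : ts = tLst.drop (i + 1) := by
        have h2 := congrArg List.tail hdrop
        simpa [List.tail_drop] using h2
      have hTi : (tuplesOf tLst)[i]? = some ((i : Int), (tLst.length : Int), t) := by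
        rw [List.getElem?_eq_getElem (by rw [length_tuplesOf]; exact hi)]
        rw [tuplesOf_getElem tLst i hi, ht]
      have hslice : PySem.List.slice (tuplesOf tLst) (some (start : Int)) (some ((i + 1 : Nat) : Int))
          = PySem.List.slice (tuplesOf tLst) (some (start : Int)) (some (i : Int))
            ++ [((i : Int), (tLst.length : Int), t)] := by
        rw [PySem.List.slice_natCast, PySem.List.slice_natCast,
          (by omega : i + 1 - start = (i - start) + 1), List.take_add_one, List.getElem?_drop,
          (by omega : start + (i - start) = i), hTi]
        rfl
      have hrange : PySem.List.pyRange (i : Int) (tLst.length : Int) 1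
          = (i : Int) :: PySem.List.pyRange ((i : Int) + 1) (tLst.length : Int) 1 :=
        PySem.List.pyRange_one_cons (by exact_mod_cast hi)
      have hcast : ((i : Int) + 1) = ((i + 1 : Nat) : Int) := by push_cast; ring
      by_cases h : PySem.Int.mod (i : Int) m = 0
      · have hends : endsFrom m tLst.length i = ((i : Int) + 1) :: endsFrom m tLst.length (i + 1) := by
          simp only [endsFrom]
          rw [hrange, List.filter_cons, if_pos (by simp [h]), List.map_cons, hcast]
          rfl
        rw [hends]
        simp only [refChunk, prepB_loop]
        rw [if_pos h, if_pos (by omega : (start : Int) < (i : Int) + 1)]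
        rw [prepB_loop_acc]
        have hnext := ih (i + 1) (i + 1) hts (le_refl _) (by omega)
        have hempty : PySem.List.slice (tuplesOf tLst) (some ((i + 1 : Nat) : Int)) (some ((i + 1 : Nat) : Int)) = [] := by
          rw [PySem.List.slice_natCast]; simp
        rw [hempty] at hnext
        rw [hcast, hslice, ← hnext]
        simp
      · have hends : endsFrom m tLst.length i = endsFrom m tLst.length (i + 1) := by
          simp only [endsFrom]
          rw [hrange, List.filter_cons, if_neg (by simp [h]), hcast]
        rw [hends]
        simp only [refChunk]
        rw [if_neg h]
        have hnext := ih (i + 1) start hts (by omega) (by omega)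
        rw [hslice] at hnext
        rw [hcast]
        exact hnext

lemma prepB_eq_refChunk (tLst : List String) (m : Int) :
    prepTargets_alt tLst m = refChunk (tLst.length : Int) m tLst 0 [] := by
  have h := refChunk_eq_prepB tLst m tLst 0 0 (by simp) (le_refl 0) (by omega)
  have hempty : PySem.List.slice (tuplesOf tLst) (some ((0 : Nat) : Int)) (some ((0 : Nat) : Int)) = [] := by
    rw [PySem.List.slice_natCast]; simp
  rw [hempty] at h
  simp only [Nat.cast_zero] at h
  have hdef : prepTargets_alt tLst m = prepB_loop (tuplesOf tLst) (endsFrom m tLst.length 0) 0 [] := by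
    simp only [prepTargets_alt, tuplesOf, endsFrom, Nat.cast_zero]
  rw [hdef, ← h]

-- ===== VERDICT (by name: the statement is the Claim_ definition above) =====
theorem prepTargets_spec : Claim_equal_prepTargets := by
  intro tLst maxPerBin _ _
  unfold Spec_prepTargets
  rw [prepA_eq_refChunk, prepB_eq_refChunk]
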